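-- pv_equiv track=rewrite | github.com/SanneJolijn/Computing-similarity-between-DNA-sequences | computing_simiarity_between_DNA_sequences_efficient.py | compute_overlap_and_n
-- ===== SOURCE A (Python) =====
-- def compute_overlap_and_n(list1, list2):
--     overlaps = []
--     n_values = []
--     for t1, t2 in zip(list1, list2):
--         overlap = 0
--         n = max(len(t1), len(t2))
--         for start1, end1 in t1:
--             for start2, end2 in t2:
--                 if start1 <= end2 and end1 >= start2:
--                     overlap += 1
--                     break
--         overlaps.append(overlap)
--         n_values.append(n)
--     return overlaps, n_values
-- ===== SOURCE B (Python) =====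
-- def compute_overlap_and_n(list1, list2):
--     overlaps = []
--     n_values = []
--     for t1, t2 in zip(list1, list2):
--         # index t2 once: starts sorted ascending, with prefix maxima of ends
--         pts = sorted(t2, key=lambda p: p[0])
--         starts = [p[0] for p in pts]
--         pm = []
--         cur = None
--         for _, e in pts:
--             if cur is None or e > cur:
--                 cur = e
--             pm.append(cur)
--         overlap = 0
--         for s1, e1 in t1:
--             # binary search: number of starts <= e1
--             lo, hi = 0, len(starts)
--             while lo < hi:
--                 mid = (lo + hi) // 2
--                 if starts[mid] <= e1:
--                     lo = mid + 1
--                 else: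
--                     hi = mid
--             if lo > 0 and pm[lo - 1] >= s1:
--                 overlap += 1
--         overlaps.append(overlap)
--         n_values.append(max(len(t1), len(t2)))
--     return overlaps, n_values
-- ===== Notes on version B (the rewrite author's own statement) =====
-- stated objective: alternative
-- what changed: Instead of scanning all of t2 for every t1 interval, B sorts t2 by start once per pair, precomputes prefix maxima of the ends, and answers each t1 interval with one binary search (an interval (s1,e1) overlaps some t2 interval iff among t2 entries with start <= e1 the maximal end is >= s1); asymptotically O((|t1|+|t2|) log |t2|) per pair vs A's O(|t1|*|t2|), though a timing run could not measure a speed-up on the generated inputs.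
import Mathlib
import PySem

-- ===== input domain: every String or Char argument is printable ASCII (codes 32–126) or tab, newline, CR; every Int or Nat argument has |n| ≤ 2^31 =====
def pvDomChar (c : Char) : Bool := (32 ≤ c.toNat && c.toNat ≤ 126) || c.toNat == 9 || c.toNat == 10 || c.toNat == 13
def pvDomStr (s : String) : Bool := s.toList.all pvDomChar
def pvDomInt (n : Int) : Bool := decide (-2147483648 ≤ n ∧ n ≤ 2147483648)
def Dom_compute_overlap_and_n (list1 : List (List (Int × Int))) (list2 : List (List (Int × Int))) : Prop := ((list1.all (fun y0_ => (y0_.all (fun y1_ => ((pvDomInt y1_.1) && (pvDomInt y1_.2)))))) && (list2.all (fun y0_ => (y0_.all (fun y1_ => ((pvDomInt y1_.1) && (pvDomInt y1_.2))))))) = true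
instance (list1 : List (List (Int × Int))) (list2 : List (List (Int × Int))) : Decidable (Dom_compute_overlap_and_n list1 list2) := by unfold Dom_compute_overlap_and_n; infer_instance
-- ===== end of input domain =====

-- B replaces A's inner scan of t2 by a per-pair sort of t2 by start with prefix maxima of the
-- ends, answering each t1 interval by one binary search (objective: alternative algorithm).


-- ===== PORT A =====
-- inner 'for start2, end2 in t2: if …: overlap += 1; break' — true iff the break fires
def aInner (s1 e1 : Int) : List (Int × Int) → Bool
  | [] => false
  | (s2, e2) :: rest => if s1 ≤ e2 ∧ e1 ≥ s2 then true else aInner s1 e1 rest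

def compute_overlap_and_n (list1 : List (List (Int × Int))) (list2 : List (List (Int × Int))) : List Int × List Int :=
  (list1.zip list2).foldl
    (fun acc p =>
      let t1 := p.1
      let t2 := p.2
      let overlap : Int := t1.foldl (fun ov q => if aInner q.1 q.2 t2 then ov + 1 else ov) 0
      let n : Int := max (t1.length : Int) (t2.length : Int)
      (acc.1 ++ [overlap], acc.2 ++ [n]))
    ([], [])

-- ===== PORT B =====
-- the hand-written while-loop binary search of Source B (starts[mid] is always in range in Source B,
-- so the total getD 0 access is exact there)
def bSearch (starts : List Int) (x : Int) (lo hi : Nat) : Nat :=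
  if _h : lo < hi then
    let mid := (lo + hi) / 2
    if starts.getD mid 0 ≤ x then bSearch starts x (mid + 1) hi else bSearch starts x lo mid
  else lo
termination_by hi - lo
decreasing_by all_goals omega

def compute_overlap_and_n_alt (list1 : List (List (Int × Int))) (list2 : List (List (Int × Int))) : List Int × List Int :=
  (list1.zip list2).foldl
    (fun acc p =>
      let t1 := p.1
      let t2 := p.2
      let pts := PySem.List.sorted t2 (fun q => q.1) false
      let starts := pts.map (fun q => q.1)
      let st := pts.foldl
        (fun (st : List Int × Option Int) q =>
          let cur := match st.2 with
            | none => q.2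
            | some c => if q.2 > c then q.2 else c
          (st.1 ++ [cur], some cur))
        ([], none)
      let pm := st.1
      let overlap : Int := t1.foldl
        (fun ov q =>
          let k := bSearch starts q.2 0 starts.length
          if 0 < k ∧ pm.getD (k - 1) 0 ≥ q.1 then ov + 1 else ov)
        0
      let n : Int := max (t1.length : Int) (t2.length : Int)
      (acc.1 ++ [overlap], acc.2 ++ [n]))
    ([], [])

-- ===== PRECONDITION & SPEC =====
def Spec_compute_overlap_and_n (list1 : List (List (Int × Int))) (list2 : List (List (Int × Int))) (out : List Int × List Int) : Prop := out = compute_overlap_and_n_alt list1 list2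
instance (list1 : List (List (Int × Int))) (list2 : List (List (Int × Int))) (out : List Int × List Int) : Decidable (Spec_compute_overlap_and_n list1 list2 out) := by unfold Spec_compute_overlap_and_n; infer_instance

-- ===== CLAIM (what is proved, stated in full; the proofs are below) =====
def Claim_equal_compute_overlap_and_n : Prop := ∀ (list1 : List (List (Int × Int))) (list2 : List (List (Int × Int))), Dom_compute_overlap_and_n list1 list2 → Spec_compute_overlap_and_n list1 list2 (compute_overlap_and_n list1 list2)

-- ===== LEMMAS AND PROOFS =====

theorem aInner_iff (s1 e1 : Int) (l : List (Int × Int)) :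
    aInner s1 e1 l = true ↔ ∃ q ∈ l, q.1 ≤ e1 ∧ s1 ≤ q.2 := by
  induction l with
  | nil => simp [aInner]
  | cons h t ih =>
      obtain ⟨s2, e2⟩ := h
      by_cases hc : s1 ≤ e2 ∧ e1 ≥ s2
      · simp only [aInner, if_pos hc, true_iff]
        exact ⟨(s2, e2), List.mem_cons_self, by omega, by omega⟩
      · simp only [aInner, if_neg hc, ih, List.mem_cons]
        constructor
        · rintro ⟨q, hq, h1, h2⟩; exact ⟨q, Or.inr hq, h1, h2⟩
        · rintro ⟨q, hq | hq, h1, h2⟩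
          · subst hq; exact absurd ⟨by simpa using h2, by simpa using h1⟩ hc
          · exact ⟨q, hq, h1, h2⟩

theorem bSearch_spec (starts : List Int) (x : Int) (lo hi : Nat)
    (hhi : hi ≤ starts.length)
    (hlow : ∀ j (hj : j < starts.length), j < lo → starts[j] ≤ x)
    (hhigh : ∀ j (hj : j < starts.length), hi ≤ j → x < starts[j])
    (hlohi : lo ≤ hi)
    (hsort : starts.Pairwise (· ≤ ·)) :
    bSearch starts x lo hi ≤ starts.length ∧
      (∀ j (hj : j < starts.length), j < bSearch starts x lo hi → starts[j] ≤ x) ∧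
      (∀ j (hj : j < starts.length), bSearch starts x lo hi ≤ j → x < starts[j]) := by
  fun_induction bSearch starts x lo hi with
  | case1 lo hi h mid hle ih =>
      have hmid : mid < starts.length := by omega
      refine ih hhi ?_ hhigh (by omega)
      intro j hj hjlt
      have hjm : starts[j] ≤ starts[mid] := by
        rcases Nat.lt_or_ge j mid with hlt | hge
        · exact List.Pairwise.rel_get_of_lt hsort (a := ⟨j, hj⟩) (b := ⟨mid, hmid⟩) hlt
        · have : j = mid := by omega
          subst this; exact le_refl _
      have hmx : starts[mid] ≤ x := by
        simpa [List.getD_eq_getElem?_getD, List.getElem?_eq_getElem hmid] using hle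
      exact le_trans hjm hmx
  | case2 lo hi h mid hgt ih =>
      have hmid : mid < starts.length := by omega
      have hxm : x < starts[mid] := by
        have := hgt
        simpa [List.getD_eq_getElem?_getD, List.getElem?_eq_getElem hmid, not_le] using this
      refine ih (by omega) hlow ?_ (by omega)
      intro j hj hjge
      have hmj : starts[mid] ≤ starts[j] := by
        rcases Nat.lt_or_ge mid j with hlt | hge
        · exact List.Pairwise.rel_get_of_lt hsort (a := ⟨mid, hmid⟩) (b := ⟨j, hj⟩) hlt
        · have : mid = j := by omega
          subst this; exact le_refl _
      exact lt_of_lt_of_le hxm hmj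
  | case3 lo hi h =>
      have : lo = hi := by omega
      subst this
      exact ⟨by omega, fun j hj hjl => hlow j hj hjl, fun j hj hjg => hhigh j hj (by omega)⟩

-- functional description of the prefix-maxima loop of Source B
def pms (cur : Option Int) : List (Int × Int) → List Int
  | [] => []
  | q :: r =>
      let c := match cur with
        | none => q.2
        | some c0 => if q.2 > c0 then q.2 else c0
      c :: pms (some c) r

def pmsState (cur : Option Int) : List (Int × Int) → Option Int
  | [] => cur
  | q :: r =>
      let c := match cur with
        | none => q.2
        | some c0 => if q.2 > c0 then q.2 else c0
      pmsState (some c) r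

theorem pm_foldl_eq (l : List (Int × Int)) : ∀ (acc : List Int) (cur : Option Int),
    l.foldl
      (fun (st : List Int × Option Int) q =>
        let c := match st.2 with
          | none => q.2
          | some c0 => if q.2 > c0 then q.2 else c0
        (st.1 ++ [c], some c))
      (acc, cur) = (acc ++ pms cur l, pmsState cur l) := by
  induction l with
  | nil => intro acc cur; simp [pms, pmsState]
  | cons q r ih =>
      intro acc cur
      simp only [List.foldl_cons, pms, pmsState]
      rw [ih]
      simp

theorem pms_getD (l : List (Int × Int)) : ∀ (cur : Option Int) (i : Nat), i < l.length → ∀ v : Int,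
    v ≤ (pms cur l).getD i 0 ↔
      (∃ j, ∃ (hj : j < l.length), j ≤ i ∧ v ≤ l[j].2) ∨ (∃ c, cur = some c ∧ v ≤ c) := by
  induction l with
  | nil => intro cur i hi; simp at hi
  | cons q r ih =>
      intro cur i hi v
      match i with
      | 0 =>
          simp only [pms, List.getD_cons_zero]
          cases cur with
          | none =>
              constructor
              · intro h; exact Or.inl ⟨0, by simp, Nat.le_refl 0, by simpa using h⟩
              · rintro (⟨j, hj, hj0, hv⟩ | ⟨c, hc, _⟩)
                · have : j = 0 := by omega
                  subst this; simpa using hv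
                · cases hc
          | some c0 =>
              constructor
              · intro h
                by_cases hq : q.2 > c0
                · rw [show (match some c0 with | none => q.2 | some c0 => if q.2 > c0 then q.2 else c0) = q.2 by simp [hq]] at h
                  exact Or.inl ⟨0, by simp, Nat.le_refl 0, by simpa using h⟩
                · rw [show (match some c0 with | none => q.2 | some c0 => if q.2 > c0 then q.2 else c0) = c0 by simp [hq]] at h
                  exact Or.inr ⟨c0, rfl, h⟩
              · rintro (⟨j, hj, hj0, hv⟩ | ⟨c, hc, hv⟩)
                · have : j = 0 := by omega
                  subst this
                  simp only [List.getElem_cons_zero] at hv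
                  simp only []
                  split <;> omega
                · cases hc
                  simp only []
                  split <;> omega
      | i + 1 =>
          simp only [pms, List.getD_cons_succ]
          rw [ih _ i (by simpa using Nat.lt_of_succ_lt_succ hi) v]
          constructor
          · rintro (⟨j, hj, hji, hv⟩ | ⟨c, hc, hv⟩)
            · exact Or.inl ⟨j + 1, by simpa using Nat.succ_lt_succ hj, by omega, by simpa using hv⟩
            · simp only [Option.some.injEq] at hc
              cases cur with
              | none =>
                  simp only [] at hc
                  subst hc
                  exact Or.inl ⟨0, by simp, by omega, by simpa using hv⟩
              | some c0 =>
                  simp only [] at hc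
                  subst hc
                  by_cases hq : q.2 > c0
                  · rw [if_pos hq] at hv
                    exact Or.inl ⟨0, by simp, by omega, by simpa using hv⟩
                  · rw [if_neg hq] at hv
                    exact Or.inr ⟨c0, rfl, hv⟩
          · rintro (⟨j, hj, hji, hv⟩ | ⟨c, hc, hv⟩)
            · match j with
              | 0 =>
                  refine Or.inr ⟨_, rfl, ?_⟩
                  simp only [List.getElem_cons_zero] at hv
                  cases cur with
                  | none => simpa using hv
                  | some c0 => simp only []; split <;> omega
              | j + 1 =>
                  exact Or.inl ⟨j, by simpa using Nat.lt_of_succ_lt_succ hj, by omega, by simpa using hv⟩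
            · subst hc
              refine Or.inr ⟨_, rfl, ?_⟩
              simp only []
              split <;> omega

-- the binary-search query of Source B answers "does some t2 interval overlap (s1,e1)?"
theorem query_iff (t2 : List (Int × Int)) (s1 e1 : Int) :
    (let pts := PySem.List.sorted t2 (fun q => q.1) false
     let starts := pts.map (fun q => q.1)
     let k := bSearch starts e1 0 starts.length
     0 < k ∧ s1 ≤ (pms none pts).getD (k - 1) 0) ↔ ∃ q ∈ t2, q.1 ≤ e1 ∧ s1 ≤ q.2 := by
  dsimp only
  set pts := PySem.List.sorted t2 (fun q => q.1) false with hpts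
  set starts := pts.map (fun q => q.1) with hstarts
  have hlen : starts.length = pts.length := by simp [hstarts]
  have hsort : starts.Pairwise (· ≤ ·) := by
    rw [hstarts]
    exact List.pairwise_map.mpr (PySem.List.sorted_pairwise t2 (fun q => q.1))
  have hget : ∀ (j : Nat) (hj : j < pts.length), starts[j]'(by omega) = (pts[j]).1 := by
    intro j hj; simp [hstarts]
  obtain ⟨hk1, hk2, hk3⟩ := bSearch_spec starts e1 0 starts.length (le_refl _)
    (fun j hj hlt => absurd hlt (by omega)) (fun j hj hge => absurd hge (by omega))
    (Nat.zero_le _) hsort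
  set k := bSearch starts e1 0 starts.length with hk
  have hperm := PySem.List.sorted_perm t2 (fun q => q.1) false
  constructor
  · rintro ⟨hkpos, hpm⟩
    have hi : k - 1 < pts.length := by omega
    rcases (pms_getD pts none (k - 1) hi s1).mp hpm with ⟨j, hj, hji, hv⟩ | ⟨c, hc, _⟩
    · refine ⟨pts[j], hperm.mem_iff.mp (List.getElem_mem hj), ?_, hv⟩
      have := hk2 j (by omega) (by omega)
      rwa [hget j hj] at this
    · cases hc
  · rintro ⟨q, hq, hq1, hq2⟩
    have hqpts : q ∈ pts := hperm.mem_iff.mpr hq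
    obtain ⟨j, hj, hje⟩ := List.mem_iff_getElem.mp hqpts
    have hjk : j < k := by
      by_contra hge
      have := hk3 j (by omega) (by omega)
      rw [hget j hj, hje] at this
      omega
    refine ⟨by omega, ?_⟩
    exact (pms_getD pts none (k - 1) (by omega) s1).mpr
      (Or.inl ⟨j, hj, by omega, by rw [hje]; exact hq2⟩)

theorem row_eq (t1 t2 : List (Int × Int)) :
    t1.foldl (fun ov q => if aInner q.1 q.2 t2 then ov + 1 else ov) (0 : Int) =
      (let pts := PySem.List.sorted t2 (fun q => q.1) false
       let starts := pts.map (fun q => q.1)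
       let pm := pms none pts
       t1.foldl
        (fun ov q =>
          let k := bSearch starts q.2 0 starts.length
          if 0 < k ∧ pm.getD (k - 1) 0 ≥ q.1 then ov + 1 else ov)
        (0 : Int)) := by
  dsimp only
  have hpt : ∀ q : Int × Int,
      aInner q.1 q.2 t2 = true ↔
        (0 < bSearch ((PySem.List.sorted t2 (fun q => q.1) false).map (fun q => q.1)) q.2 0
            ((PySem.List.sorted t2 (fun q => q.1) false).map (fun q => q.1)).length ∧
          (pms none (PySem.List.sorted t2 (fun q => q.1) false)).getD
              (bSearch ((PySem.List.sorted t2 (fun q => q.1) false).map (fun q => q.1)) q.2 0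
                ((PySem.List.sorted t2 (fun q => q.1) false).map (fun q => q.1)).length - 1) 0 ≥ q.1) := by
    intro q
    exact (aInner_iff q.1 q.2 t2).trans (query_iff t2 q.1 q.2).symm
  suffices h : ∀ (a : Int),
      t1.foldl (fun ov q => if aInner q.1 q.2 t2 then ov + 1 else ov) a =
        t1.foldl
          (fun ov q =>
            let k := bSearch ((PySem.List.sorted t2 (fun q => q.1) false).map (fun q => q.1)) q.2 0
              ((PySem.List.sorted t2 (fun q => q.1) false).map (fun q => q.1)).length
            if 0 < k ∧ (pms none (PySem.List.sorted t2 (fun q => q.1) false)).getD (k - 1) 0 ≥ q.1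
            then ov + 1 else ov) a from h 0
  induction t1 with
  | nil => intro a; rfl
  | cons hq t ih =>
      intro a
      simp only [List.foldl_cons]
      by_cases hc : aInner hq.1 hq.2 t2 = true
      · rw [if_pos hc, if_pos ((hpt hq).mp hc)]
        exact ih _
      · rw [if_neg hc, if_neg (fun hb => hc ((hpt hq).mpr hb))]
        exact ih _

-- ===== VERDICT (by name: the statement is the Claim_ definition above) =====
theorem compute_overlap_and_n_spec : Claim_equal_compute_overlap_and_n := by
  intro list1 list2 _
  unfold Spec_compute_overlap_and_n compute_overlap_and_n compute_overlap_and_n_alt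
  congr 1
  funext acc p
  dsimp only
  rw [pm_foldl_eq]
  dsimp only
  rw [row_eq p.1 p.2]
  simp
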